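-- pv_equiv track=rewrite | github.com/Sans-drian/CompBio_Week3-Individual-Assignment | assignment1q2.py | count_rna_codon_frequencies
-- ===== SOURCE A (Python) =====
-- def count_rna_codon_frequencies(rna_sequence):
--     rna_codon_frequencies = {}
--     for i in range(0, len(rna_sequence), 3):
--         rna_codon = rna_sequence[i:i+3]
--         if rna_codon in rna_codon_frequencies:
--             rna_codon_frequencies[rna_codon] += 1
--         else:
--             rna_codon_frequencies[rna_codon] = 1
--     return rna_codon_frequencies
-- ===== SOURCE B (Python) =====
-- def count_rna_codon_frequencies(rna_sequence):
--     codons = [rna_sequence[i:i+3] for i in range(0, len(rna_sequence), 3)]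
--
--     def count_first_and_recurse(cs):
--         if not cs:
--             return {}
--         first = cs[0]
--         rest = [c for c in cs if c != first]
--         freq = {first: len(cs) - len(rest)}
--         freq.update(count_first_and_recurse(rest))
--         return freq
--
--     return count_first_and_recurse(codons)
-- ===== Notes on version B (the rewrite author's own statement) =====
-- stated objective: alternative
-- what changed: Replaces A's single-pass dictionary tallying by a recursive partition scheme: take the first codon, count it by filtering all its occurrences out of the codon list, recurse on the shrinking remainder; no counting dictionary is maintained.
import Mathlib
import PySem

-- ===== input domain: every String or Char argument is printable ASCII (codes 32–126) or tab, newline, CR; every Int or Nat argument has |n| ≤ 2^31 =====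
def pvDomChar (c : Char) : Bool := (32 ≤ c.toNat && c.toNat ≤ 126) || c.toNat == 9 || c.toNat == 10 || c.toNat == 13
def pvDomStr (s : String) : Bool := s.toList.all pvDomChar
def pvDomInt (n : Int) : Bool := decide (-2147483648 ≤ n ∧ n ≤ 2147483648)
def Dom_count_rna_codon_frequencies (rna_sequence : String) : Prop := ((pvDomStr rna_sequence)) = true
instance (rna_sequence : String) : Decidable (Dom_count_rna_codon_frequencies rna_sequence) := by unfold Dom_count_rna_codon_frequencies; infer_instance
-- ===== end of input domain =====

-- B counts by recursive partition (take the first codon, count it by filtering its occurrences out, recurse on the remainder) instead of A's single-pass dictionary tallying; same result, alternative decomposition.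

-- ===== PORT A =====
def count_rna_codon_frequencies (rna_sequence : String) : List (String × Int) :=
  ((PySem.List.pyRange 0 (PySem.Str.len rna_sequence) 3).foldl
    (fun d i =>
      let rna_codon := PySem.Str.slice rna_sequence (some i) (some (i + 3))
      if d.contains rna_codon then
        d.insert rna_codon (d.getD rna_codon 0 + 1)
      else
        d.insert rna_codon 1)
    PySem.Dict.empty).items

-- ===== PORT B =====
-- helper count_first_and_recurse: the dict literal {first: cnt} followed by update with
-- the recursive result (whose keys, drawn from rest, all differ from first) is, in
-- insertion order, exactly a cons.
def pvCountFirstAndRecurse : List String → List (String × Int)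
  | [] => []
  | first :: t =>
    let rest := (first :: t).filter (fun c => !(c == first))
    (first, ((first :: t).length : Int) - (rest.length : Int)) :: pvCountFirstAndRecurse rest
termination_by cs => cs.length
decreasing_by
  simp
  exact List.length_filter_le _ _

def count_rna_codon_frequencies_alt (rna_sequence : String) : List (String × Int) :=
  let codons := (PySem.List.pyRange 0 (PySem.Str.len rna_sequence) 3).map
    (fun i => PySem.Str.slice rna_sequence (some i) (some (i + 3)))
  pvCountFirstAndRecurse codons

-- ===== PRECONDITION & SPEC =====
def Spec_count_rna_codon_frequencies (rna_sequence : String) (out : List (String × Int)) : Prop := out = count_rna_codon_frequencies_alt rna_sequence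
instance (rna_sequence : String) (out : List (String × Int)) : Decidable (Spec_count_rna_codon_frequencies rna_sequence out) := by unfold Spec_count_rna_codon_frequencies; infer_instance

-- ===== CLAIM (what is proved, stated in full; the proofs are below) =====
def Claim_equal_count_rna_codon_frequencies : Prop := ∀ (rna_sequence : String), Dom_count_rna_codon_frequencies rna_sequence → Spec_count_rna_codon_frequencies rna_sequence (count_rna_codon_frequencies rna_sequence)

-- ===== LEMMAS AND PROOFS =====
-- A's loop body is exactly the Counter step: when the codon is absent, getD gives 0.
theorem pvStepEq :
    (fun (d : PySem.Dict String Int) (c : String) =>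
      if d.contains c then d.insert c (d.getD c 0 + 1) else d.insert c 1) =
    (fun (d : PySem.Dict String Int) (c : String) => d.insert c (d.getD c 0 + 1)) := by
  funext d c
  by_cases h : d.contains c
  · simp [h]
  · have hf : d.contains c = false := by simpa using h
    rw [PySem.Dict.getD_of_not_contains d (0 : Int) hf, if_neg h]
    norm_num

-- skipping occurrences of an element already in the accumulator leaves the Set fold unchanged
theorem pvFoldlAddFilter (x : String) (l : List String) :
    ∀ acc : PySem.Set String, x ∈ acc →
      List.foldl PySem.Set.add acc (l.filter (fun y => !(y == x))) = List.foldl PySem.Set.add acc l := by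
  induction l with
  | nil => intro acc _; rfl
  | cons y t ih =>
    intro acc hx
    by_cases hyx : y = x
    · subst hyx
      have hadd : PySem.Set.add acc y = acc := by
        simp [PySem.Set.add, PySem.Set.contains, hx]
      simp only [List.filter_cons, beq_self_eq_true, Bool.not_true, if_neg (by simp : ¬ (false = true)), List.foldl_cons, hadd]
      exact ih acc hx
    · have hmem : x ∈ PySem.Set.add acc y := by
        simp [PySem.Set.add, PySem.Set.contains]
        split <;> simp [hx]
      have hb : (!(y == x)) = true := by simp [hyx]
      simp only [List.filter_cons, hb, List.foldl_cons]
      exact ih (PySem.Set.add acc y) hmem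

-- a head element that never recurs in the list commutes out of the Set fold
theorem pvFoldlAddConsOut (c : String) (l : List String) :
    ∀ s : PySem.Set String, (∀ y ∈ l, y ≠ c) →
      List.foldl PySem.Set.add (c :: s) l = c :: List.foldl PySem.Set.add s l := by
  induction l with
  | nil => intro s _; rfl
  | cons y t ih =>
    intro s hne
    have hyc : y ≠ c := hne y (List.mem_cons_self ..)
    have hadd : PySem.Set.add (c :: s) y = c :: PySem.Set.add s y := by
      simp [PySem.Set.add, PySem.Set.contains, hyc]
      split <;> simp
    simp only [List.foldl_cons, hadd]
    exact ih _ (fun z hz => hne z (List.mem_cons_of_mem _ hz))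

-- first-occurrence dedup of a cons: the head, then dedup of the tail with the head filtered out
theorem pvDedupCons (c : String) (t : List String) :
    PySem.List.dedup (c :: t) = c :: PySem.List.dedup (t.filter (fun y => !(y == c))) := by
  simp only [PySem.List.dedup_eq_ofList, PySem.Set.ofList_eq_foldl, List.foldl_cons]
  have h0 : PySem.Set.add ([] : PySem.Set String) c = [c] := by
    simp [PySem.Set.add, PySem.Set.contains]
  rw [h0, ← pvFoldlAddFilter c t [c] (by simp)]
  have h1 : ([c] : List String) = c :: [] := rfl
  rw [h1, pvFoldlAddConsOut c _ []
        (by intro y hy; have := List.of_mem_filter hy; simpa using this)]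

-- what the filter removed is exactly the count of the head
theorem pvCountHead (c : String) (l : List String) :
    ((l.length : Int)) - ((l.filter (fun y => !(y == c))).length : Int) = (l.count c : Int) := by
  induction l with
  | nil => simp
  | cons y t ih =>
    by_cases hyc : y = c
    · subst hyc
      simp only [List.filter_cons, List.count_cons_self, List.length_cons, beq_self_eq_true, Bool.not_true]
      simp only [Bool.false_eq_true, if_false]
      push_cast
      omega
    · have hb2 : (y == c) = false := by simp [hyc]
      simp [hb2, List.count_cons]
      push_cast
      omega

-- filtering out a different element does not change a count
theorem pvCountFilterNe (c x : String) (l : List String) (hx : x ≠ c) :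
    (l.filter (fun y => !(y == c))).count x = l.count x := by
  induction l with
  | nil => rfl
  | cons y t ih =>
    by_cases hyc : y = c
    · subst hyc
      have hxy : (y == x) = false := by simp; exact fun h => hx h.symm
      simp only [List.filter_cons, beq_self_eq_true, Bool.not_true, Bool.false_eq_true, if_false, ih, List.count_cons, hxy]
      simp
    · have hb2 : (y == c) = false := by simp [hyc]
      simp [hb2, List.count_cons, ih]

-- B's recursion computes exactly the dedup-and-count characterisation of a frequency dict
theorem pvCFRChar (cs : List String) :
    pvCountFirstAndRecurse cs =
      (PySem.List.dedup cs).map (fun c => (c, (cs.count c : Int))) := by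
  induction cs using pvCountFirstAndRecurse.induct with
  | case1 => rw [pvCountFirstAndRecurse]; rfl
  | case2 first t rest ih =>
    rw [pvCountFirstAndRecurse]
    have hfc : (first :: t).filter (fun y => !(y == first)) = t.filter (fun y => !(y == first)) := by
      simp
    rw [pvDedupCons, List.map_cons]
    congr 1
    · show (first, ((first :: t).length : Int) - (((first :: t).filter (fun c => !(c == first))).length : Int)) = _
      rw [pvCountHead first (first :: t)]
    · have hir : rest = t.filter (fun y => !(y == first)) := hfc
      rw [hir] at ih
      rw [hfc, ih]
      apply List.map_congr_left
      intro x hx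
      have hxmem : x ∈ t.filter (fun y => !(y == first)) := (PySem.List.mem_dedup _ _).mp hx
      have hxne : x ≠ first := by simpa using (List.of_mem_filter hxmem)
      have hcnt : (t.filter (fun y => !(y == first))).count x = (first :: t).count x := by
        rw [pvCountFilterNe first x t hxne, List.count_cons]
        have : (first == x) = false := by simp; exact fun h => hxne h.symm
        simp [this]
      simp [hcnt]

-- ===== VERDICT (by name: the statement is the Claim_ definition above) =====
theorem count_rna_codon_frequencies_spec : Claim_equal_count_rna_codon_frequencies := by
  intro s _
  unfold Spec_count_rna_codon_frequencies count_rna_codon_frequencies count_rna_codon_frequencies_alt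
  simp only []
  rw [← List.foldl_map (f := fun i => PySem.Str.slice s (some i) (some (i + 3)))
        (g := fun (d : PySem.Dict String Int) c =>
          if d.contains c then d.insert c (d.getD c 0 + 1) else d.insert c 1),
      pvStepEq, PySem.Dict.foldl_insert_getD_add_one_eq_counter, PySem.Dict.items_counter,
      pvCFRChar, PySem.List.dedup_eq_ofList]
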